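-- pv_equiv track=rewrite | github.com/paiml/depyler | examples/hard_infer_fibonacci.py | fib_count_even
-- ===== SOURCE A (Python) =====
-- def fib_count_even(n) -> int:
--     """Count even fibonacci numbers in first n terms."""
--     count: int = 0
--     prev: int = 0
--     curr: int = 1
--     idx: int = 1
--     while idx <= n:
--         if curr % 2 == 0:
--             count = count + 1
--         temp: int = curr
--         curr = prev + curr
--         prev = temp
--         idx = idx + 1
--     return count
-- ===== SOURCE B (Python) =====
-- def fib_count_even(n) -> int:
--     """Count even fibonacci numbers in first n terms.
--
--     Exactly every third Fibonacci term is even, so the count is floor(n/3).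
--     """
--     return max(n, 0) // 3
-- ===== Notes on version B (the rewrite author's own statement) =====
-- stated objective: faster
-- what changed: Replaced the O(n) big-integer Fibonacci loop with the closed form max(n,0)//3, since exactly every third Fibonacci term is even.
import Mathlib
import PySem

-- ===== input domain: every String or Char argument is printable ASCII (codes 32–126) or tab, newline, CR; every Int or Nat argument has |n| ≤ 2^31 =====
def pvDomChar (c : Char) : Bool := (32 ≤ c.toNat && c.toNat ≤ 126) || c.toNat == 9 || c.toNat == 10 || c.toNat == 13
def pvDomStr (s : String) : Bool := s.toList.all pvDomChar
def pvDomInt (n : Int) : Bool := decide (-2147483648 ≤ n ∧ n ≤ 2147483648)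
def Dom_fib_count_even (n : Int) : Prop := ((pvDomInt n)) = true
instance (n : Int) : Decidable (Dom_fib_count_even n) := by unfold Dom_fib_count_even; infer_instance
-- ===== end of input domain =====

-- B replaces A's O(n) Fibonacci loop by the closed form max(n,0)//3 (every third Fibonacci term is even).

-- ===== PORT A =====
-- literal transliteration of A's while-loop with state (count, prev, curr, idx)
def fibLoopA (count prev curr idx n : Int) : Int :=
  if _h : idx ≤ n then
    fibLoopA (if PySem.Int.mod curr 2 = 0 then count + 1 else count) curr (prev + curr) (idx + 1) n
  else
    count
termination_by (n + 1 - idx).toNat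
decreasing_by omega

def fib_count_even (n : Int) : Int := fibLoopA 0 0 1 1 n

-- ===== PORT B =====
def fib_count_even_alt (n : Int) : Int := PySem.Int.floordiv (max n 0) 3

-- ===== PRECONDITION & SPEC =====
def Spec_fib_count_even (n : Int) (out : Int) : Prop := out = fib_count_even_alt n
instance (n : Int) (out : Int) : Decidable (Spec_fib_count_even n out) := by unfold Spec_fib_count_even; infer_instance

-- ===== CLAIM (what is proved, stated in full; the proofs are below) =====
def Claim_equal_fib_count_even : Prop := ∀ (n : Int), Dom_fib_count_even n → Spec_fib_count_even n (fib_count_even n)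

-- ===== LEMMAS AND PROOFS =====

-- Loop characterisation: with k = (n+1-idx).toNat remaining iterations, the number of evens produced
-- depends only on the parity phase of (prev, curr) — the parities cycle (0,1)→(1,1)→(1,0)→(0,1).
theorem fibLoopA_eq (k : Nat) : ∀ (count prev curr idx n : Int), (n + 1 - idx).toNat = k →
    fibLoopA count prev curr idx n = count +
      (if prev % 2 = 0 ∧ curr % 2 = 1 then ((k / 3 : Nat) : Int)
       else if curr % 2 = 1 then (((k + 1) / 3 : Nat) : Int)
       else if prev % 2 = 1 then (((k + 2) / 3 : Nat) : Int)
       else (k : Int)) := by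
  induction k with
  | zero =>
    intro count prev curr idx n hk
    rw [fibLoopA]
    have : ¬ idx ≤ n := by omega
    simp [this]
  | succ k ih =>
    intro count prev curr idx n hk
    have hle : idx ≤ n := by omega
    rw [fibLoopA]
    simp only [hle, dif_pos]
    have hrec := ih (if PySem.Int.mod curr 2 = 0 then count + 1 else count) curr (prev + curr)
      (idx + 1) n (by omega)
    rw [hrec]
    have hmod : PySem.Int.mod curr 2 = curr % 2 := PySem.Int.mod_eq_emod_of_pos (a := curr) (b := 2) (by norm_num)
    have hp := Int.emod_two_eq prev
    have hc := Int.emod_two_eq curr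
    have hpc : (prev + curr) % 2 = (prev % 2 + curr % 2) % 2 := by omega
    rcases hp with hp | hp <;> rcases hc with hc | hc <;>
      simp [hmod, hp, hc, hpc] <;> push_cast <;> omega

-- ===== VERDICT (by name: the statement is the Claim_ definition above) =====
theorem fib_count_even_spec : Claim_equal_fib_count_even := by
  intro n _
  unfold Spec_fib_count_even fib_count_even fib_count_even_alt
  rw [fibLoopA_eq n.toNat 0 0 1 1 n (by omega),
    PySem.Int.floordiv_eq_ediv_of_pos (a := max n 0) (b := 3) (by norm_num)]
  have : ((0:Int) % 2 = 0 ∧ (1:Int) % 2 = 1) := by decide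
  rw [if_pos this, zero_add]
  omega
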